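-- pv_equiv track=rewrite | github.com/Jayesh1211/QEEG | phase2_1_updated.py | smooth_labels
-- ===== SOURCE A (Python) =====
-- def smooth_labels(labels: list, window: int = 20) -> list:
--     """
--     Rolling majority vote. window=20 means each point is decided
--     by the surrounding 10s of predictions (20 × 0.5s steps).
--     Eliminates sub-second flicker.
--     """
--     smoothed = []
--     half = window // 2
--     for i in range(len(labels)):
--         start = max(0, i - half)
--         end   = min(len(labels), i + half)
--         chunk = labels[start:end]
--         smoothed.append("calm" if chunk.count("calm") >= len(chunk) / 2 else "stress")
--     return smoothed
-- ===== SOURCE B (Python) =====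
-- def smooth_labels(labels: list, window: int = 20) -> list:
--     """Rolling majority vote via one prefix-sum pass: O(n) instead of O(n*window)."""
--     n = len(labels)
--     half = window // 2
--     prefix = [0]
--     c = 0
--     for lab in labels:
--         if lab == "calm":
--             c += 1
--         prefix.append(c)
--     out = []
--     for i in range(n):
--         s = max(0, i - half)
--         e = min(n, i + half)
--         if e <= s:
--             out.append("calm")
--         else:
--             cnt = prefix[e] - prefix[s]
--             out.append("calm" if 2 * cnt >= e - s else "stress")
--     return out
-- ===== Notes on version B (the rewrite author's own statement) =====
-- stated objective: faster
-- what changed: B replaces the per-index slice-copy-and-count with a single prefix-sum pass over the labels, so each window count is an O(1) subtraction instead of an O(window) recount.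
-- outside the precondition, e.g. on smooth_labels(['calm', '', ''], -1): A returns ['stress', 'calm', 'calm'], B returns ['calm', 'calm', 'calm']
import Mathlib
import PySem

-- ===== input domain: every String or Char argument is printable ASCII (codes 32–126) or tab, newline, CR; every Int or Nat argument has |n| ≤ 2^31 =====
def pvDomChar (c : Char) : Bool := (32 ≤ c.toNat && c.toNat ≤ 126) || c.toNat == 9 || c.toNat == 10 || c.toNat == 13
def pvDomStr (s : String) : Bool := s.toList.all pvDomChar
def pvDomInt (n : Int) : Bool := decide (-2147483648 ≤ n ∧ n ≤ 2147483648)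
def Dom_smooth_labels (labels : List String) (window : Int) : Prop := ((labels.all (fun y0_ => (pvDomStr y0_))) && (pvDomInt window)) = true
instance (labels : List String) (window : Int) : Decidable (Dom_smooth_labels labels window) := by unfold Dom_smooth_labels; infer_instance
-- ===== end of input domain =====

-- B replaces the per-index slice-copy-and-count with a single prefix-sum pass (O(n) vs O(n*window)).

-- ===== PORT A =====
-- 'chunk.count("calm") >= len(chunk) / 2' compares ints via float '/'; '2*count >= len' is exact
-- for these magnitudes (|values| ≤ 2^31 < 2^53).
def smooth_labels (labels : List String) (window : Int) : List String :=
  let half := PySem.Int.floordiv window 2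
  (PySem.List.pyRange 0 (labels.length : Int) 1).foldl (fun smoothed i =>
    let start := max 0 (i - half)
    let «end» := min (labels.length : Int) (i + half)
    let chunk := PySem.List.slice labels (some start) (some «end»)
    smoothed ++ [if 2 * (chunk.count "calm" : Int) ≥ (chunk.length : Int) then "calm" else "stress"]) []

-- ===== PORT B =====
def smooth_labels_alt (labels : List String) (window : Int) : List String :=
  let n : Int := (labels.length : Int)
  let half := PySem.Int.floordiv window 2
  let pc := labels.foldl (fun (pc : List Int × Int) lab =>
      let c := if lab == "calm" then pc.2 + 1 else pc.2
      (pc.1 ++ [c], c)) ([0], 0)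
  let pfx := pc.1
  (PySem.List.pyRange 0 n 1).foldl (fun out i =>
    let s := max 0 (i - half)
    let e := min n (i + half)
    if e ≤ s then out ++ ["calm"]
    else
      let cnt := PySem.List.pyGetD pfx e 0 - PySem.List.pyGetD pfx s 0
      out ++ [if 2 * cnt ≥ e - s then "calm" else "stress"]) []

-- ===== PRECONDITION & SPEC =====
-- Pre_ excludes negative windows (outside the task's natural domain of window sizes): there A still
-- returns a value, but it is an artefact of Python's negative-end slice wraparound (labels[s:e] with e < 0).
def Pre_smooth_labels (labels : List String) (window : Int) : Prop := 0 ≤ window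
instance (labels : List String) (window : Int) : Decidable (Pre_smooth_labels labels window) := by unfold Pre_smooth_labels; infer_instance
def pvWitness_smooth_labels : List String × Int := (["calm", "stress", "calm"], 2)

def Spec_smooth_labels (labels : List String) (window : Int) (out : List String) : Prop := out = smooth_labels_alt labels window
instance (labels : List String) (window : Int) (out : List String) : Decidable (Spec_smooth_labels labels window out) := by unfold Spec_smooth_labels; infer_instance

-- ===== CLAIM (what is proved, stated in full; the proofs are below) =====
def Claim_equal_smooth_labels : Prop := ∀ (labels : List String) (window : Int), Dom_smooth_labels labels window → Pre_smooth_labels labels window → Spec_smooth_labels labels window (smooth_labels labels window)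

-- ===== LEMMAS AND PROOFS =====

-- the prefix loop of B builds [0, c1, …, cn] where ck = count of "calm" in the first k labels
theorem prefix_loop_spec (ls : List String) (acc : List Int) (c : Int) :
    (ls.foldl (fun (pc : List Int × Int) lab =>
      let c := if lab == "calm" then pc.2 + 1 else pc.2
      (pc.1 ++ [c], c)) (acc, c))
    = (acc ++ (List.range ls.length).map (fun k => c + ((ls.take (k+1)).count "calm" : Int)),
       c + (ls.count "calm" : Int)) := by
  induction ls generalizing acc c with
  | nil => simp
  | cons l rest ih =>
    simp only [List.foldl_cons, ih, Prod.mk.injEq]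
    constructor
    · simp only [List.length_cons, List.range_succ_eq_map, List.map_cons, List.map_map,
        List.take_succ_cons, List.count_cons, List.append_assoc, List.singleton_append]
      congr 1 <;> (by_cases h : l == "calm" <;> simp [h, Function.comp]) <;> omega
    · by_cases h : l == "calm" <;> simp [List.count_cons, h] <;> omega

-- per-index window count: counting "calm" in a slice is a difference of prefix counts
theorem count_slice_eq (xs : List String) (s e : Int) (hs : 0 ≤ s) (hse : s ≤ e) :
    ((PySem.List.slice xs (some s) (some e)).count "calm" : Int)
      = ((xs.take e.toNat).count "calm" : Int) - ((xs.take s.toNat).count "calm" : Int) := by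
  rw [PySem.List.slice_toNat xs hs (le_trans hs hse)]
  have hmono : s.toNat ≤ e.toNat := Int.toNat_le_toNat hse
  have h : xs.take e.toNat = xs.take s.toNat ++ (xs.drop s.toNat).take (e.toNat - s.toNat) := by
    rw [← List.take_add, Nat.add_sub_cancel' hmono]
  rw [h, List.count_append]
  push_cast
  ring

theorem length_slice_eq (xs : List String) (s e : Int) (hs : 0 ≤ s) (hse : s ≤ e)
    (hen : e ≤ (xs.length : Int)) :
    (((PySem.List.slice xs (some s) (some e)).length : Int)) = e - s := by
  rw [PySem.List.slice_toNat xs hs (le_trans hs hse)]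
  simp only [List.length_take, List.length_drop]
  omega

-- indexing the prefix list built by B's first loop
theorem pyGetD_prefix (xs : List String) (m : Int) (h0 : 0 ≤ m) (hm : m ≤ (xs.length : Int)) :
    PySem.List.pyGetD
        ([(0 : Int)] ++ (List.range xs.length).map (fun k => 0 + ((xs.take (k+1)).count "calm" : Int))) m 0
      = ((xs.take m.toNat).count "calm" : Int) := by
  have hlen : ([(0 : Int)] ++ (List.range xs.length).map
      (fun k => 0 + ((xs.take (k+1)).count "calm" : Int))).length = xs.length + 1 := by simp
  have hm' : m < (([(0 : Int)] ++ (List.range xs.length).map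
      (fun k => 0 + ((xs.take (k+1)).count "calm" : Int))).length : Int) := by
    rw [hlen]; push_cast; omega
  rw [PySem.List.pyGetD_eq_getElem _ 0 h0 hm']
  simp only [List.singleton_append, List.getElem_cons]
  split_ifs with hz
  · simp [hz]
  · simp only [List.getElem_map, List.getElem_range]
    rw [Nat.sub_add_cancel (by omega)]
    ring

theorem smooth_labels_spec : Claim_equal_smooth_labels := by
  intro labels window _ hpre
  unfold Pre_smooth_labels at hpre
  unfold Spec_smooth_labels smooth_labels smooth_labels_alt
  rw [prefix_loop_spec]
  dsimp only
  have hhalf : 0 ≤ PySem.Int.floordiv window 2 := by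
    rw [PySem.Int.floordiv_eq_ediv_of_pos (by norm_num)]
    exact Int.ediv_nonneg hpre (by norm_num)
  set half := PySem.Int.floordiv window 2 with hh
  set n : Int := (labels.length : Int) with hn
  -- push the if of B's loop body inside the append
  have hbody : (fun (out : List String) (i : Int) =>
      if min n (i + half) ≤ max 0 (i - half) then out ++ ["calm"]
      else out ++ [if 2 * (PySem.List.pyGetD ([(0 : Int)] ++ (List.range labels.length).map
            (fun k => 0 + ((labels.take (k+1)).count "calm" : Int))) (min n (i + half)) 0
          - PySem.List.pyGetD ([(0 : Int)] ++ (List.range labels.length).map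
            (fun k => 0 + ((labels.take (k+1)).count "calm" : Int))) (max 0 (i - half)) 0)
          ≥ min n (i + half) - max 0 (i - half) then "calm" else "stress"])
      = (fun (out : List String) (i : Int) => out ++
        [if min n (i + half) ≤ max 0 (i - half) then "calm"
         else if 2 * (PySem.List.pyGetD ([(0 : Int)] ++ (List.range labels.length).map
            (fun k => 0 + ((labels.take (k+1)).count "calm" : Int))) (min n (i + half)) 0
          - PySem.List.pyGetD ([(0 : Int)] ++ (List.range labels.length).map
            (fun k => 0 + ((labels.take (k+1)).count "calm" : Int))) (max 0 (i - half)) 0)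
          ≥ min n (i + half) - max 0 (i - half) then "calm" else "stress"]) := by
    funext out i
    split_ifs <;> rfl
  rw [hbody, PySem.List.foldl_append_singleton_eq_map, PySem.List.foldl_append_singleton_eq_map]
  simp only [List.nil_append]
  apply List.map_congr_left
  intro i hi
  rw [PySem.List.mem_pyRange_one] at hi
  obtain ⟨h0i, hin⟩ := hi
  have hs0 : (0:Int) ≤ max 0 (i - half) := le_max_left _ _
  have hse : max 0 (i - half) ≤ min n (i + half) := by omega
  have hen : min n (i + half) ≤ n := min_le_left _ _
  have he0 : (0:Int) ≤ min n (i + half) := le_trans hs0 hse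
  rw [count_slice_eq labels _ _ hs0 hse, length_slice_eq labels _ _ hs0 hse hen,
    pyGetD_prefix labels _ he0 hen, pyGetD_prefix labels _ hs0 (le_trans hse hen)]
  by_cases hdeg : min n (i + half) ≤ max 0 (i - half)
  · have heq : min n (i + half) = max 0 (i - half) := le_antisymm hdeg hse
    rw [if_pos hdeg, heq]
    simp
  · rw [if_neg hdeg]
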